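-- pv_equiv track=rewrite | github.com/SmashAF/Current_Coding | weekly_challenge.py | cut_the_ropes
-- ===== SOURCE A (Python) =====
-- def cut_the_ropes(lst):
--     ropes = []
--     n = len(lst)
--
--     ropes.append(len(lst))
--
--     lst.sort()
--     cuttingLength = lst[0]
--
--     for i in range(1, n):
--         if (lst[i] - cuttingLength > 0):
--             ropes.append(n - i)
--             cuttingLength = lst[i]
--
--     return ropes
-- ===== SOURCE B (Python) =====
-- def cut_the_ropes(lst):
--     lst.sort()
--     counts = {}
--     for v in lst:
--         counts[v] = counts.get(v, 0) + 1
--     res = []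
--     remaining = len(lst)
--     for c in counts.values():
--         res.append(remaining)
--         remaining -= c
--     return res
-- ===== Notes on version B (the rewrite author's own statement) =====
-- stated objective: alternative
-- what changed: B replaces A's index loop that detects strict increases with a cuttingLength state by a value-to-count dictionary built in one pass and a walk over its run counts subtracting from a running remaining total.
import Mathlib
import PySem

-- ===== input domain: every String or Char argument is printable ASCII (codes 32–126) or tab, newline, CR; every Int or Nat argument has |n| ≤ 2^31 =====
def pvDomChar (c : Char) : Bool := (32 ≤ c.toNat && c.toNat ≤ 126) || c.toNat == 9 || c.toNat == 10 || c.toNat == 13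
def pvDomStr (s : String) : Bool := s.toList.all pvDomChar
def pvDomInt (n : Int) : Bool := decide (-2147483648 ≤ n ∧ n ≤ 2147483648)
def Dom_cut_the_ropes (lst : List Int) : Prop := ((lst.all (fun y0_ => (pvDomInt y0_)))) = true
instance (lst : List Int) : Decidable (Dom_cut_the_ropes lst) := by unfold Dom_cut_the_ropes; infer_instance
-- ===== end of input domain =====

-- B replaces A's index scan for strict increases by a value→count dict and a running
-- subtraction over its run counts (different data structure/decomposition; objective: alternative).
-- Both A and B sort lst in place in Python; the equivalence proved here is about the RETURN value.

-- ===== PORT A =====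
def cut_the_ropes (lst : List Int) : List Int :=
  let n := lst.length
  let ropes : List Int := [] ++ [(n : Int)]          -- ropes = []; ropes.append(len(lst))
  let s := PySem.List.sorted lst id                  -- lst.sort() (in-place; return value modelled)
  match PySem.List.pyGet? s 0 with                   -- cuttingLength = lst[0]; none = IndexError
  | none => []                                       -- Python raises here (empty list); outside Pre_
  | some c0 =>
    -- for i in range(1, n): index i is always in range, so pyGetD's default is never used
    let fin := (PySem.List.pyRange 1 (n : Int)).foldl
      (fun (st : List Int × Int) i =>
        if PySem.List.pyGetD s i 0 - st.2 > 0 then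
          (st.1 ++ [(n : Int) - i], PySem.List.pyGetD s i 0)
        else st) (ropes, c0)
    fin.1

-- ===== PORT B =====
def cut_the_ropes_alt (lst : List Int) : List Int :=
  let s := PySem.List.sorted lst id                  -- lst.sort()
  let counts := s.foldl
    (fun (d : PySem.Dict Int Int) v => d.insert v (d.getD v 0 + 1)) PySem.Dict.empty
  let fin := counts.values.foldl
    (fun (st : List Int × Int) c => (st.1 ++ [st.2], st.2 - c)) ([], (s.length : Int))
  fin.1

-- ===== PRECONDITION & SPEC =====
-- Pre_ excludes only the empty list, on which Python A raises IndexError at its first-element access.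
def Pre_cut_the_ropes (lst : List Int) : Prop := lst ≠ []
instance (lst : List Int) : Decidable (Pre_cut_the_ropes lst) := by
  unfold Pre_cut_the_ropes; infer_instance
def pvWitness_cut_the_ropes : List Int := [3, 1, 2, 1]

def Spec_cut_the_ropes (lst : List Int) (out : List Int) : Prop := out = cut_the_ropes_alt lst
instance (lst : List Int) (out : List Int) : Decidable (Spec_cut_the_ropes lst out) := by
  unfold Spec_cut_the_ropes; infer_instance

-- ===== CLAIM (what is proved, stated in full; the proofs are below) =====
def Claim_equal_cut_the_ropes : Prop := ∀ (lst : List Int), Dom_cut_the_ropes lst →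
  Pre_cut_the_ropes lst → Spec_cut_the_ropes lst (cut_the_ropes lst)

-- ===== LEMMAS AND PROOFS =====

-- run counts of a (sorted) list: currently inside a run of value v seen c times
def runCountsFrom (v c : Int) : List Int → List Int
  | [] => [c]
  | w :: t => if w = v then runCountsFrom v (c + 1) t else c :: runCountsFrom w 1 t

-- cons-producing form of A's loop (index i, cutting length c)
def aList (n : Int) : List Int → Int → Int → List Int
  | [], _, _ => []
  | v :: t, i, c => if v - c > 0 then (n - i) :: aList n t (i + 1) v else aList n t (i + 1) c

-- pair-state form of A's loop
def aLoop (n : Int) : List Int → Int → Int → List Int → List Int × Int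
  | [], _, c, acc => (acc, c)
  | v :: t, i, c, acc =>
    if v - c > 0 then aLoop n t (i + 1) v (acc ++ [n - i]) else aLoop n t (i + 1) c acc

-- cons-producing form of B's loop
def bList : List Int → Int → List Int
  | [], _ => []
  | c :: cs, rem => rem :: bList cs (rem - c)

theorem aLoop_fst (n : Int) : ∀ (t : List Int) (i c : Int) (acc : List Int),
    (aLoop n t i c acc).1 = acc ++ aList n t i c := by
  intro t
  induction t with
  | nil => intro i c acc; simp [aLoop, aList]
  | cons v t ih =>
    intro i c acc
    by_cases h : c < v <;>
      simp [aLoop, aList, h, ih, List.append_assoc]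

theorem bLoop_fst : ∀ (cs : List Int) (rem : Int) (acc : List Int),
    (cs.foldl (fun (st : List Int × Int) c => (st.1 ++ [st.2], st.2 - c)) (acc, rem)).1
      = acc ++ bList cs rem := by
  intro cs
  induction cs with
  | nil => intro rem acc; simp [bList]
  | cons c cs ih =>
    intro rem acc
    simp [bList, ih, List.append_assoc]

-- A's fold over range(1, n) equals the structural aLoop over the tail of s
theorem foldA (s : List Int) (n : Int) (hn : n = (s.length : Int)) :
    ∀ (t pref : List Int) (acc : List Int) (c : Int), s = pref ++ t →
    (PySem.List.pyRange (pref.length : Int) n).foldl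
      (fun (st : List Int × Int) i =>
        if PySem.List.pyGetD s i 0 - st.2 > 0 then
          (st.1 ++ [n - i], PySem.List.pyGetD s i 0)
        else st) (acc, c)
      = aLoop n t (pref.length : Int) c acc := by
  intro t
  induction t with
  | nil =>
    intro pref acc c hsp
    have hq : n = (pref.length : Int) := by simp [hn, hsp]
    simp [aLoop, hq, PySem.List.pyRange]
  | cons v t ih =>
    intro pref acc c hsp
    subst hsp
    have hlen : (pref.length : Int) < n := by
      rw [hn]; simp only [List.length_append, List.length_cons]; push_cast; omega
    have hget : PySem.List.pyGetD (pref ++ v :: t) (pref.length : Int) 0 = v := by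
      rw [PySem.List.pyGetD_eq_getElem _ _ (by positivity) (by rw [← hn]; exact hlen)]
      simp
    rw [PySem.List.pyRange_one_cons hlen]
    simp only [List.foldl_cons, hget]
    have hsp' : pref ++ v :: t = (pref ++ [v]) ++ t := by simp
    have key := ih (pref ++ [v])
    rw [show ((pref ++ [v]).length : Int) = (pref.length : Int) + 1 by
      simp only [List.length_append, List.length_cons, List.length_nil]; push_cast; omega] at key
    by_cases h : c < v
    · rw [if_pos (show v - c > 0 by omega)]
      rw [key (acc ++ [n - (pref.length : Int)]) v hsp']
      simp [aLoop, h]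
    · rw [if_neg (show ¬ v - c > 0 by omega)]
      rw [key acc c hsp']
      simp [aLoop, h]

-- bridge: B's subtraction walk over run counts equals A's increase-detecting walk
theorem bridge : ∀ (t : List Int) (v c n i : Int),
    List.Pairwise (· ≤ ·) (v :: t) →
    bList (runCountsFrom v c t) (n - i + c) = (n - i + c) :: aList n t i v := by
  intro t
  induction t with
  | nil => intro v c n i _; simp [runCountsFrom, bList, aList]
  | cons w t ih =>
    intro v c n i hp
    rcases List.pairwise_cons.mp hp with ⟨hall, hp'⟩
    have hvw : v ≤ w := hall w (by simp)
    by_cases h : w = v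
    · subst h
      have hpw : List.Pairwise (· ≤ ·) (w :: t) := hp'
      have := ih w (c + 1) n (i + 1) hpw
      have harith : n - (i + 1) + (c + 1) = n - i + c := by ring
      rw [runCountsFrom, if_pos rfl]
      rw [harith] at this
      rw [this]
      simp [aList]
    · have hlt : v < w := lt_of_le_of_ne hvw (fun e => h e.symm)
      rw [runCountsFrom, if_neg h]
      have := ih w 1 n (i + 1) hp'
      have harith : n - (i + 1) + 1 = n - i := by ring
      rw [harith] at this
      have hyes : w - v > 0 := by omega
      simp only [bList, aList, hyes, if_pos]
      rw [show n - i + c - c = n - i by ring, this]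

-- dict step computations
theorem dict_getD_last (pre : List (Int × Int)) (v c : Int)
    (h : ∀ p ∈ pre, p.1 ≠ v) :
    (PySem.Dict.mk (pre ++ [(v, c)]) : PySem.Dict Int Int).getD v 0 = c := by
  induction pre with
  | nil => simp [PySem.Dict.getD, PySem.Dict.get?]
  | cons p pre ih =>
    have hp : p.1 ≠ v := h p (by simp)
    have ih' := ih (fun q hq => h q (by simp [hq]))
    simpa [PySem.Dict.getD, PySem.Dict.get?, List.find?, hp] using ih'

theorem dict_insert_bump (pre : List (Int × Int)) (v c : Int)
    (h : ∀ p ∈ pre, p.1 ≠ v) :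
    (PySem.Dict.mk (pre ++ [(v, c)]) : PySem.Dict Int Int).insert v (c + 1)
      = PySem.Dict.mk (pre ++ [(v, c + 1)]) := by
  have hcont : (PySem.Dict.mk (pre ++ [(v, c)]) : PySem.Dict Int Int).contains v = true := by
    simp [PySem.Dict.contains]
  simp only [PySem.Dict.insert, hcont, if_pos]
  congr 1
  rw [List.map_append]
  congr 1
  · rw [List.map_congr_left (g := id) (fun p hp => by simp [h p hp])]
    exact List.map_id pre
  · simp

theorem dict_insert_new (pre : List (Int × Int)) (w : Int)
    (h : ∀ p ∈ pre, p.1 ≠ w) :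
    (PySem.Dict.mk pre : PySem.Dict Int Int).insert w
        ((PySem.Dict.mk pre : PySem.Dict Int Int).getD w 0 + 1)
      = PySem.Dict.mk (pre ++ [(w, 1)]) := by
  have hcont : (PySem.Dict.mk pre : PySem.Dict Int Int).contains w = false := by
    simp only [PySem.Dict.contains, List.any_eq_false]
    intro p hp; simpa using h p hp
  have hget : (PySem.Dict.mk pre : PySem.Dict Int Int).getD w 0 = 0 := by
    have : List.find? (fun p => p.1 == w) pre = none := by
      rw [List.find?_eq_none]
      intro p hp; simpa using h p hp
    simp [PySem.Dict.getD, PySem.Dict.get?, this]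
  rw [hget]
  simp [PySem.Dict.insert, hcont]

-- B's counter fold over a sorted tail yields exactly the run counts
theorem counter_values : ∀ (t : List Int) (pre : List (Int × Int)) (v c : Int),
    List.Pairwise (· ≤ ·) (v :: t) → (∀ p ∈ pre, p.1 < v) →
    (t.foldl (fun (d : PySem.Dict Int Int) x => d.insert x (d.getD x 0 + 1))
        (PySem.Dict.mk (pre ++ [(v, c)]))).values
      = pre.map Prod.snd ++ runCountsFrom v c t := by
  intro t
  induction t with
  | nil => intro pre v c _ _; simp [runCountsFrom, PySem.Dict.values]
  | cons w t ih =>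
    intro pre v c hp hpre
    rcases List.pairwise_cons.mp hp with ⟨hall, hp'⟩
    have hvw : v ≤ w := hall w (by simp)
    have hne : ∀ p ∈ pre, p.1 ≠ v := fun p hq => ne_of_lt (hpre p hq)
    by_cases h : w = v
    · subst h
      simp only [List.foldl_cons]
      rw [dict_getD_last pre w c hne, dict_insert_bump pre w c hne]
      rw [ih pre w (c + 1) hp' hpre]
      rw [runCountsFrom, if_pos rfl]
    · have hlt : v < w := lt_of_le_of_ne hvw (fun e => h e.symm)
      have hnew : ∀ p ∈ (pre ++ [(v, c)]), p.1 ≠ w := by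
        intro p hpmem
        rcases List.mem_append.mp hpmem with hl | hr
        · exact ne_of_lt (lt_trans (hpre p hl) hlt)
        · simp at hr; rw [hr]; exact ne_of_lt hlt
      simp only [List.foldl_cons]
      rw [dict_insert_new (pre ++ [(v, c)]) w hnew]
      have hpre' : ∀ p ∈ (pre ++ [(v, c)]), p.1 < w := by
        intro p hpmem
        rcases List.mem_append.mp hpmem with hl | hr
        · exact lt_trans (hpre p hl) hlt
        · simp at hr; rw [hr]; exact hlt
      rw [List.append_assoc] at *
      have := ih (pre ++ [(v, c)]) w 1 hp' hpre'
      rw [List.append_assoc] at this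
      rw [this]
      rw [runCountsFrom, if_neg h]
      simp

-- ===== VERDICT (by name: the statement is the Claim_ definition above) =====
theorem cut_the_ropes_spec : Claim_equal_cut_the_ropes := by
  intro lst _ hpre
  unfold Spec_cut_the_ropes cut_the_ropes cut_the_ropes_alt
  have hperm : (PySem.List.sorted lst id).Perm lst := PySem.List.sorted_perm lst id false
  have hsorted : List.Pairwise (· ≤ ·) (PySem.List.sorted lst id) := by
    simpa using PySem.List.sorted_pairwise lst id
  have hlen : (PySem.List.sorted lst id).length = lst.length := hperm.length_eq
  have hsne : PySem.List.sorted lst id ≠ [] := by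
    intro h
    exact hpre (List.eq_nil_of_length_eq_zero (by rw [← hlen, h]; rfl))
  obtain ⟨v0, t, hst⟩ := List.exists_cons_of_ne_nil hsne
  rw [hst] at hsorted hlen ⊢
  have hget0 : PySem.List.pyGet? (v0 :: t) 0 = some v0 := by
    simp [PySem.List.pyGet?, PySem.List.pyIdx?]
  -- A side
  have hA := foldA (v0 :: t) (lst.length : Int) (by exact_mod_cast hlen.symm)
    t [v0] [(lst.length : Int)] v0 rfl
  rw [show (([v0] : List Int).length : Int) = 1 by simp] at hA
  -- B side
  have hBinit : (PySem.Dict.empty : PySem.Dict Int Int).insert v0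
      ((PySem.Dict.empty : PySem.Dict Int Int).getD v0 0 + 1) = PySem.Dict.mk [(v0, 1)] := by
    simp [PySem.Dict.insert, PySem.Dict.contains, PySem.Dict.getD, PySem.Dict.get?,
      PySem.Dict.empty]
  have hB : (t.foldl (fun (d : PySem.Dict Int Int) x => d.insert x (d.getD x 0 + 1))
      (PySem.Dict.mk [(v0, 1)])).values = runCountsFrom v0 1 t := by
    simpa using counter_values t [] v0 1 hsorted (by simp)
  have hbr := bridge t v0 1 (lst.length : Int) 1 hsorted
  rw [show (lst.length : Int) - 1 + 1 = (lst.length : Int) by ring] at hbr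
  have hlenc : ((v0 :: t).length : Int) = (lst.length : Int) := by exact_mod_cast hlen
  simp only [hget0, List.foldl_cons, hBinit, hB, hlenc, List.nil_append]
  rw [hA, aLoop_fst, bLoop_fst, hbr]
  simp
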